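-- pv_equiv track=rewrite | github.com/startsUp/Algorithms-Practice- | amzn/ways-to-split-string-primes/count-string-primes.py | count_string_primes
-- ===== SOURCE A (Python) =====
-- def getPrimes(n):
--     isPrime = [True for i in range(n+1)]
--     isPrime[0] = False
--     isPrime[1] = False
--     p = 2
--     while (p * p <= n):
--         if (isPrime[p]):
--             for i in range(p*p, n+1, p):
--                 isPrime[i] = False
--         p += 1
--     return isPrime
--
-- def count_string_primes(s):
--     isPrime = getPrimes(1000000)
--     dp = [-1 for i in range(len(s) + 1)]
--     dp[0] = 1 # base case => if reached, means that the split is valid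
--     mod = 1000000007
--     def findAllPrimes(num, i):
--         if dp[i] != -1: # index has already been counted
--             return dp[i]
--         cnt = 0
--
--         # starting from cur index i, test all possible 6 digit primes
--         for j in range(1, 7):
--             if (i - j >= 0 and num[i-j]!= '0' and isPrime[int(num[i-j:i])]):
--                 cnt+= findAllPrimes(num, i - j)
--                 cnt %= mod
--
--         # memoize the result
--         dp[i] = cnt
--         return cnt
--     return findAllPrimes(s, len(s))
-- ===== SOURCE B (Python) =====
-- def getPrimes(n):
--     isPrime = [True for i in range(n+1)]
--     isPrime[0] = False
--     isPrime[1] = False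
--     p = 2
--     while (p * p <= n):
--         if (isPrime[p]):
--             for i in range(p*p, n+1, p):
--                 isPrime[i] = False
--         p += 1
--     return isPrime
--
-- def count_string_primes(s):
--     # bottom-up iterative DP instead of A's backward memoized recursion
--     isPrime = getPrimes(1000000)
--     mod = 1000000007
--     n = len(s)
--     dp = [0] * (n + 1)
--     dp[0] = 1
--     for i in range(1, n + 1):
--         for j in range(1, 7):
--             if i - j >= 0 and s[i-j] != '0' and isPrime[int(s[i-j:i])]:
--                 dp[i] = (dp[i] + dp[i-j]) % mod
--     return dp[n]
-- ===== Notes on version B (the rewrite author's own statement) =====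
-- stated objective: simpler
-- what changed: Replaced A's backward memoized recursion (dp sentinel -1, nested recursive findAllPrimes) with a plain bottom-up forward DP loop filling dp[0..n]; the sieve helper is kept as is.
-- outside the precondition, e.g. on count_string_primes('a000000'): A returns 0, B raises ValueError
import Mathlib
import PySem

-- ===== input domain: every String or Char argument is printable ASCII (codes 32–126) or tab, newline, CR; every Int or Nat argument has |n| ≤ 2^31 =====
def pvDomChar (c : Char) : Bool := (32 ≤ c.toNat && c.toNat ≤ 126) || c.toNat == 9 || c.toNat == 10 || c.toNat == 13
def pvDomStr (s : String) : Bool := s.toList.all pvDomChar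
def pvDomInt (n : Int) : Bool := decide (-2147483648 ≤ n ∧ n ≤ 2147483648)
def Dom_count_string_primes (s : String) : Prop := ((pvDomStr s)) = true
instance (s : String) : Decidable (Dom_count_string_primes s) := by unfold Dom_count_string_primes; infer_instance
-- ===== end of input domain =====

-- B replaces A's backward memoized recursion by a bottom-up forward DP loop (simpler decomposition, same values).

-- ===== PORT A =====
-- shared helper: Python getPrimes(n) — sieve of Eratosthenes (identical code in Source A and Source B).
-- `fuel` only guards totality of the while loop (p increments while p*p ≤ n, so n+1 steps always suffice); it never changes the result.
def sieveLoop (n : Nat) : Nat → Nat → Array Bool → Array Bool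
  | 0, _, a => a
  | fuel + 1, p, a =>
    if p * p ≤ n then
      let a' := if a.getD p false then
          (PySem.List.pyRange ((p : Int) * (p : Int)) ((n : Int) + 1) (p : Int)).foldl
            (fun b i => b.set! i.toNat false) a
        else a
      sieveLoop n fuel (p + 1) a'
    else a

def getPrimes (n : Nat) : Array Bool :=
  let a := Array.replicate (n + 1) true
  let a := a.set! 0 false
  let a := a.set! 1 false
  sieveLoop n (n + 1) 2 a

-- shared helper: the loop-body test `num[i-j] != '0' and isPrime[int(num[i-j:i])]` (identical in both Pythons).
-- int(...) is PySem.Int.ofChars?; on its `none` (ValueError) Python raises — excluded by Pre_ below (the .getD 0 default is never reached on Pre_).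
def condPrime (isPrime : Array Bool) (num : List Char) (i j : Nat) : Bool :=
  (num.getD (i - j) '0' ≠ '0') &&
  isPrime.getD ((PySem.Int.ofChars? (PySem.List.slice num (some ((i - j : Nat) : Int)) (some ((i : Nat) : Int)))).getD 0).toNat false

-- A's findAllPrimes: memoized recursion; the `for j in range(1, 7)` loop is the foldl over [1..6] carrying (cnt, dp);
-- the guard `i - j >= 0` is `j ≤ i`. `fuel` only guards totality (each recursive call has strictly smaller i, so
-- fuel = len(s)+1 always suffices); it never changes the result.
def fapA (isP : Array Bool) (num : List Char) : Nat → Nat → List Int → Int × List Int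
  | 0, _, dp => (0, dp)
  | fuel + 1, i, dp =>
    if dp.getD i (-1) ≠ -1 then (dp.getD i (-1), dp)
    else
      let r := (List.range' 1 6).foldl
        (fun (acc : Int × List Int) j =>
          if j ≤ i ∧ condPrime isP num i j = true then
            let r2 := fapA isP num fuel (i - j) acc.2
            (PySem.Int.mod (acc.1 + r2.1) 1000000007, r2.2)
          else acc) (0, dp)
      (r.1, r.2.set i r.1)

def count_string_primes (s : String) : Int :=
  let isPrime := getPrimes 1000000
  let num := s.toList
  let dp := (List.replicate (num.length + 1) (-1 : Int)).set 0 1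
  (fapA isPrime num (num.length + 1) num.length dp).1

-- ===== PORT B =====
-- B's inner `for j in range(1, 7)` body and outer loop body
def innerB (isPrime : Array Bool) (num : List Char) (i : Nat) (dp : List Int) (j : Nat) : List Int :=
  if j ≤ i ∧ condPrime isPrime num i j = true then
    dp.set i (PySem.Int.mod (dp.getD i 0 + dp.getD (i - j) 0) 1000000007)
  else dp

def outerB (isPrime : Array Bool) (num : List Char) (dp : List Int) (i : Nat) : List Int :=
  (List.range' 1 6).foldl (innerB isPrime num i) dp

def count_string_primes_alt (s : String) : Int :=
  let isPrime := getPrimes 1000000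
  let num := s.toList
  let n := num.length
  let dp := (List.replicate (n + 1) (0 : Int)).set 0 1
  ((List.range' 1 n).foldl (outerB isPrime num) dp).getD n 0

-- ===== PRECONDITION & SPEC =====
-- Pre_ excludes strings containing a non-decimal-digit character: there Python's int() raises ValueError in A
-- (except degenerate cases such as "a000000" where every examined window starts with '0' and A returns 0 while B raises).
def Pre_count_string_primes (s : String) : Prop := s.toList.all (fun c => c.isDigit) = true
instance (s : String) : Decidable (Pre_count_string_primes s) := by unfold Pre_count_string_primes; infer_instance

def pvWitness_count_string_primes : String := "2357"

def Spec_count_string_primes (s : String) (out : Int) : Prop := out = count_string_primes_alt s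
instance (s : String) (out : Int) : Decidable (Spec_count_string_primes s out) := by unfold Spec_count_string_primes; infer_instance

-- ===== CLAIM (what is proved, stated in full; the proofs are below) =====
def Claim_equal_count_string_primes : Prop := ∀ (s : String), Dom_count_string_primes s → Pre_count_string_primes s → Spec_count_string_primes s (count_string_primes s)

-- ===== LEMMAS AND PROOFS =====
-- getD/set facts used throughout (specialised to Int lists)
lemma pvGetD_set_self (l : List Int) (i : Nat) (a d : Int) (h : i < l.length) :
    (l.set i a).getD i d = a := by
  simp [List.getD_eq_getElem?_getD, h]

lemma pvGetD_set_ne (l : List Int) {i j : Nat} (a d : Int) (h : i ≠ j) :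
    (l.set i a).getD j d = l.getD j d := by
  simp [List.getD_eq_getElem?_getD, List.getElem?_set_ne h]

-- The common recurrence both programs compute: g c i = number of prime splits of the first i characters (mod 10^9+7),
-- gPart c i j0 a = the remaining iterations j = j0+1 .. 6 of the j-loop applied to accumulator a.
mutual
def gPart (c : Nat → Nat → Bool) (i j0 : Nat) (a : Int) : Int :=
  if h6 : j0 < 6 then
    if hj : j0 + 1 ≤ i ∧ c i (j0 + 1) = true then
      gPart c i (j0 + 1) (PySem.Int.mod (a + g c (i - (j0 + 1))) 1000000007)
    else gPart c i (j0 + 1) a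
  else a
termination_by (i, 6 - j0)
decreasing_by
  · apply Prod.Lex.left; omega
  · apply Prod.Lex.right; omega
  · apply Prod.Lex.right; omega

def g (c : Nat → Nat → Bool) (i : Nat) : Int :=
  if i = 0 then 1 else gPart c i 0 0
termination_by (i, 7)
decreasing_by apply Prod.Lex.right; omega
end

lemma g_zero (c : Nat → Nat → Bool) : g c 0 = 1 := by rw [g]; simp

-- ===== A-side: the memoized recursion computes g =====
def InvA (c : Nat → Nat → Bool) (dp : List Int) : Prop :=
  dp.getD 0 (-1) = 1 ∧ ∀ k, dp.getD k (-1) = -1 ∨ dp.getD k (-1) = g c k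

lemma fapA_spec (isP : Array Bool) (num : List Char) :
    ∀ fuel i dp, i < fuel → InvA (condPrime isP num) dp →
      (fapA isP num fuel i dp).1 = g (condPrime isP num) i ∧
      InvA (condPrime isP num) (fapA isP num fuel i dp).2 := by
  intro fuel
  induction fuel with
  | zero => intro i dp h _; omega
  | succ fuel ih =>
  intro i dp hfi hdp
  have hJ : ∀ k j0 cnt dp, j0 + k = 6 → InvA (condPrime isP num) dp →
      ((List.range' (j0 + 1) k).foldl
        (fun (acc : Int × List Int) j =>
          if j ≤ i ∧ condPrime isP num i j = true then
            let r2 := fapA isP num fuel (i - j) acc.2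
            (PySem.Int.mod (acc.1 + r2.1) 1000000007, r2.2)
          else acc) (cnt, dp)).1 = gPart (condPrime isP num) i j0 cnt ∧
      InvA (condPrime isP num) ((List.range' (j0 + 1) k).foldl
        (fun (acc : Int × List Int) j =>
          if j ≤ i ∧ condPrime isP num i j = true then
            let r2 := fapA isP num fuel (i - j) acc.2
            (PySem.Int.mod (acc.1 + r2.1) 1000000007, r2.2)
          else acc) (cnt, dp)).2 := by
    intro k
    induction k with
    | zero =>
      intro j0 cnt dp h6 hdp
      rw [gPart, dif_neg (by omega : ¬ j0 < 6)]
      exact ⟨rfl, hdp⟩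
    | succ k ihk =>
      intro j0 cnt dp h6 hdp
      rw [List.range'_succ, List.foldl_cons, gPart, dif_pos (by omega : j0 < 6)]
      by_cases hj : j0 + 1 ≤ i ∧ condPrime isP num i (j0 + 1) = true
      · rw [dif_pos hj, if_pos hj]
        have hlt : i - (j0 + 1) < fuel := by omega
        obtain ⟨h1, h2⟩ := ih (i - (j0 + 1)) dp hlt hdp
        show ((List.range' (j0 + 1 + 1) k).foldl
              (fun (acc : Int × List Int) j =>
                if j ≤ i ∧ condPrime isP num i j = true then
                  let r2 := fapA isP num fuel (i - j) acc.2
                  (PySem.Int.mod (acc.1 + r2.1) 1000000007, r2.2)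
                else acc)
              (PySem.Int.mod (cnt + (fapA isP num fuel (i - (j0 + 1)) dp).1) 1000000007,
               (fapA isP num fuel (i - (j0 + 1)) dp).2)).1
            = gPart (condPrime isP num) i (j0 + 1)
                (PySem.Int.mod (cnt + g (condPrime isP num) (i - (j0 + 1))) 1000000007) ∧
            InvA (condPrime isP num) ((List.range' (j0 + 1 + 1) k).foldl
              (fun (acc : Int × List Int) j =>
                if j ≤ i ∧ condPrime isP num i j = true then
                  let r2 := fapA isP num fuel (i - j) acc.2
                  (PySem.Int.mod (acc.1 + r2.1) 1000000007, r2.2)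
                else acc)
              (PySem.Int.mod (cnt + (fapA isP num fuel (i - (j0 + 1)) dp).1) 1000000007,
               (fapA isP num fuel (i - (j0 + 1)) dp).2)).2
        rw [h1]
        exact ihk (j0 + 1) _ _ (by omega) h2
      · rw [dif_neg hj, if_neg hj]
        exact ihk (j0 + 1) cnt dp (by omega) hdp
  rw [fapA]
  by_cases hm : dp.getD i (-1) ≠ -1
  · rw [if_pos hm]
    rcases hdp.2 i with h | h
    · exact absurd h hm
    · exact ⟨h, hdp⟩
  · rw [if_neg hm]
    have hm' : dp.getD i (-1) = -1 := by omega
    have hi0 : i ≠ 0 := by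
      intro h0; rw [h0, hdp.1] at hm'; norm_num at hm'
    obtain ⟨h1, h2⟩ := hJ 6 0 0 dp (by omega) hdp
    set r := (List.range' (0 + 1) 6).foldl
        (fun (acc : Int × List Int) j =>
          if j ≤ i ∧ condPrime isP num i j = true then
            let r2 := fapA isP num fuel (i - j) acc.2
            (PySem.Int.mod (acc.1 + r2.1) 1000000007, r2.2)
          else acc) ((0 : Int), dp) with hr
    have hg : r.1 = g (condPrime isP num) i := by
      rw [h1, g, if_neg hi0]
    show r.1 = g (condPrime isP num) i ∧ InvA (condPrime isP num) (r.2.set i r.1)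
    refine ⟨hg, ?_, ?_⟩
    · rw [pvGetD_set_ne _ _ _ hi0]
      exact h2.1
    · intro k
      by_cases hk : i = k
      · subst hk
        rcases Nat.lt_or_ge i r.2.length with hl | hl
        · right; rw [pvGetD_set_self _ _ _ _ hl, hg]
        · rw [List.set_eq_of_length_le hl]
          exact h2.2 i
      · rw [pvGetD_set_ne _ _ _ hk]
        exact h2.2 k

-- ===== B-side: the bottom-up loops compute g =====

lemma innerB_spec (isP : Array Bool) (num : List Char) (i : Nat) :
    ∀ k j0 dp, j0 + k = 6 → i < dp.length →
      (∀ k', k' < i → dp.getD k' 0 = g (condPrime isP num) k') →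
      ((List.range' (j0 + 1) k).foldl (innerB isP num i) dp).length = dp.length ∧
      ((List.range' (j0 + 1) k).foldl (innerB isP num i) dp).getD i 0
        = gPart (condPrime isP num) i j0 (dp.getD i 0) ∧
      ∀ k', k' ≠ i → ((List.range' (j0 + 1) k).foldl (innerB isP num i) dp).getD k' 0 = dp.getD k' 0 := by
  intro k
  induction k with
  | zero =>
    intro j0 dp h6 hlen hlow
    rw [gPart, dif_neg (by omega : ¬ j0 < 6)]
    exact ⟨rfl, rfl, fun _ _ => rfl⟩
  | succ k ihk =>
    intro j0 dp h6 hlen hlow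
    rw [List.range'_succ, List.foldl_cons, gPart, dif_pos (by omega : j0 < 6)]
    by_cases hj : j0 + 1 ≤ i ∧ condPrime isP num i (j0 + 1) = true
    · rw [dif_pos hj]
      rw [show innerB isP num i dp (j0 + 1)
            = dp.set i (PySem.Int.mod (dp.getD i 0 + dp.getD (i - (j0 + 1)) 0) 1000000007) from
          by rw [innerB, if_pos hj]]
      have hrd : dp.getD (i - (j0 + 1)) 0 = g (condPrime isP num) (i - (j0 + 1)) :=
        hlow _ (by omega)
      set v := PySem.Int.mod (dp.getD i 0 + dp.getD (i - (j0 + 1)) 0) 1000000007 with hv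
      have hlen' : i < (dp.set i v).length := by simpa using hlen
      have hlow' : ∀ k', k' < i → (dp.set i v).getD k' 0 = g (condPrime isP num) k' := by
        intro k' hk'
        rw [pvGetD_set_ne _ _ _ (by omega : i ≠ k')]
        exact hlow k' hk'
      obtain ⟨l1, l2, l3⟩ := ihk (j0 + 1) (dp.set i v) (by omega) hlen' hlow'
      refine ⟨by simpa using l1, ?_, ?_⟩
      · rw [l2, pvGetD_set_self _ _ _ _ hlen, hv, hrd]
      · intro k' hk'
        rw [l3 k' hk', pvGetD_set_ne _ _ _ (fun h => hk' h.symm)]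
    · rw [dif_neg hj]
      rw [show innerB isP num i dp (j0 + 1) = dp from by rw [innerB, if_neg hj]]
      exact ihk (j0 + 1) dp (by omega) hlen hlow

def InvB (c : Nat → Nat → Bool) (n m : Nat) (dp : List Int) : Prop :=
  dp.length = n + 1 ∧ (∀ k, k ≤ m → dp.getD k 0 = g c k) ∧ (∀ k, m < k → dp.getD k 0 = 0)

lemma outerB_spec (isP : Array Bool) (num : List Char) (n : Nat) :
    ∀ m dp, m ≤ n → InvB (condPrime isP num) n 0 dp →
      InvB (condPrime isP num) n m ((List.range' 1 m).foldl (outerB isP num) dp) := by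
  intro m
  induction m with
  | zero => intro dp _ h; simpa using h
  | succ m ihm =>
    intro dp hm hdp
    rw [List.range'_concat, List.foldl_append, List.foldl_cons, List.foldl_nil]
    obtain ⟨l1, l2, l3⟩ := ihm dp (by omega) hdp
    set prev := (List.range' 1 m).foldl (outerB isP num) dp with hprev
    rw [show 1 + 1 * m = m + 1 from by omega]
    rw [show outerB isP num prev (m + 1)
          = (List.range' (0 + 1) 6).foldl (innerB isP num (m + 1)) prev from by rw [outerB]]
    have hlen : m + 1 < prev.length := by omega
    have hlow : ∀ k', k' < m + 1 → prev.getD k' 0 = g (condPrime isP num) k' := by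
      intro k' hk'; exact l2 k' (by omega)
    obtain ⟨r1, r2, r3⟩ := innerB_spec isP num (m + 1) 6 0 prev rfl hlen hlow
    refine ⟨by omega, ?_, ?_⟩
    · intro k hk
      by_cases hki : k = m + 1
      · subst hki
        rw [r2, l3 (m + 1) (by omega), g, if_neg (by omega : ¬ m + 1 = 0)]
      · rw [r3 k hki]
        exact l2 k (by omega)
    · intro k hk
      rw [r3 k (by omega)]
      exact l3 k (by omega)

-- initial-table invariants
lemma invA_init (isP : Array Bool) (num : List Char) (n : Nat) :
    InvA (condPrime isP num) ((List.replicate (n + 1) (-1 : Int)).set 0 1) := by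
  constructor
  · exact pvGetD_set_self _ _ _ _ (by simp)
  · intro k
    by_cases hk : (0 : Nat) = k
    · right
      rw [← hk, pvGetD_set_self _ _ _ _ (by simp), g_zero]
    · left
      rw [pvGetD_set_ne _ _ _ hk]
      rcases Nat.lt_or_ge k (n + 1) with hl | hl
      · exact List.getD_replicate _ hl
      · have hnone : (List.replicate (n + 1) (-1 : Int))[k]? = none :=
          List.getElem?_eq_none (by simpa using hl)
        simp [List.getD_eq_getElem?_getD, hnone]

lemma invB_init (isP : Array Bool) (num : List Char) (n : Nat) :
    InvB (condPrime isP num) n 0 ((List.replicate (n + 1) (0 : Int)).set 0 1) := by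
  refine ⟨by simp, ?_, ?_⟩
  · intro k hk
    have hk0 : k = 0 := by omega
    subst hk0
    rw [pvGetD_set_self _ _ _ _ (by simp), g_zero]
  · intro k hk
    rw [pvGetD_set_ne _ _ _ (by omega : (0 : Nat) ≠ k)]
    rcases Nat.lt_or_ge k (n + 1) with hl | hl
    · exact List.getD_replicate _ hl
    · have hnone : (List.replicate (n + 1) (0 : Int))[k]? = none :=
        List.getElem?_eq_none (by simpa using hl)
      simp [List.getD_eq_getElem?_getD, hnone]

-- ===== VERDICT (by name: the statement is the Claim_ definition above) =====
theorem count_string_primes_spec : Claim_equal_count_string_primes := by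
  intro s _ _
  show count_string_primes s = count_string_primes_alt s
  show (fapA (getPrimes 1000000) s.toList (s.toList.length + 1) s.toList.length
          ((List.replicate (s.toList.length + 1) (-1 : Int)).set 0 1)).1
      = ((List.range' 1 s.toList.length).foldl (outerB (getPrimes 1000000) s.toList)
          ((List.replicate (s.toList.length + 1) (0 : Int)).set 0 1)).getD s.toList.length 0
  have hA := (fapA_spec (getPrimes 1000000) s.toList (s.toList.length + 1) s.toList.length _
      (by omega) (invA_init (getPrimes 1000000) s.toList s.toList.length)).1
  have hB := (outerB_spec (getPrimes 1000000) s.toList s.toList.length s.toList.length _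
      le_rfl (invB_init (getPrimes 1000000) s.toList s.toList.length)).2.1
      s.toList.length le_rfl
  rw [hA, hB]
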